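-- pv_equiv track=rewrite | github.com/mateuszwwwrobel/CheckersGame | checkers.py | white_field_filter
-- ===== SOURCE A (Python) =====
-- def white_field_filter(field_list):
--     """
--         Function that filter all available moves if there is not any white field accidentally.
--     """
--     white_fields = [1, 3, 5, 7, 10, 12, 14, 16, 17, 19, 21, 23, 26, 28, 30, 32,
--                     33, 35, 37, 39, 42, 44, 46, 48, 49, 51, 53, 55, 58, 60, 62, 64]
--     filter_moves = []
--     for number in field_list:
--         if number in white_fields:
--             continue
--         elif number < 2 or number > 64:
--             continue
--         else:
--             filter_moves.append(number)
--
--     return filter_moves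
-- ===== SOURCE B (Python) =====
-- def white_field_filter(field_list):
--     # Keep numbers on the board (2..64) whose checkerboard parity is black:
--     # number n lies in row (n-1)//8; n is white iff (n + row) is odd.
--     return [n for n in field_list
--             if 2 <= n <= 64 and (n + (n - 1) // 8) % 2 == 0]
-- ===== Notes on version B (the rewrite author's own statement) =====
-- stated objective: faster
-- what changed: Replaced the 32-element white_fields lookup table and the loop with continue branches by a single list comprehension using a closed-form checkerboard parity test: keep n iff 2 <= n <= 64 and (n + (n-1)//8) % 2 == 0, removing the inner 32-element membership scan.
import Mathlib
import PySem

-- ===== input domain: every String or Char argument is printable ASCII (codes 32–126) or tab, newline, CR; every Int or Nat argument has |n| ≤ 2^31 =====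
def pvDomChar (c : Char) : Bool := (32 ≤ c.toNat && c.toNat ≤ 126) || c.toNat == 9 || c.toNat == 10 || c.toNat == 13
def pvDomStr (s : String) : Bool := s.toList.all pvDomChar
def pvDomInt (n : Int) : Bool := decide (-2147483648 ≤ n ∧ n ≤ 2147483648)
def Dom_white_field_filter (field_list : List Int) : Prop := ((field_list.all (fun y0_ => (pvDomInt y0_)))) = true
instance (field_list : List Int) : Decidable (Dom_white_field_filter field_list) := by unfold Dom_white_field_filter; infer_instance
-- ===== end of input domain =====

-- ===== PORT A =====
-- B: one-pass filter with a closed-form checkerboard parity test instead of A's 32-element table (simpler).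
def white_field_filter (field_list : List Int) : List Int :=
  let white_fields : List Int := [1, 3, 5, 7, 10, 12, 14, 16, 17, 19, 21, 23, 26, 28, 30, 32,
                                  33, 35, 37, 39, 42, 44, 46, 48, 49, 51, 53, 55, 58, 60, 62, 64]
  field_list.foldl (fun filter_moves number =>
    if number ∈ white_fields then filter_moves
    else if number < 2 ∨ number > 64 then filter_moves
    else filter_moves ++ [number]) []

-- ===== PORT B =====
def white_field_filter_alt (field_list : List Int) : List Int :=
  field_list.filter (fun n =>
    decide (2 ≤ n) && decide (n ≤ 64) && (PySem.Int.mod (n + PySem.Int.floordiv (n - 1) 8) 2 == 0))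

-- ===== PRECONDITION & SPEC =====
def Spec_white_field_filter (field_list : List Int) (out : List Int) : Prop := out = white_field_filter_alt field_list
instance (field_list : List Int) (out : List Int) : Decidable (Spec_white_field_filter field_list out) := by unfold Spec_white_field_filter; infer_instance

-- ===== CLAIM (what is proved, stated in full; the proofs are below) =====
def Claim_equal_white_field_filter : Prop := ∀ (field_list : List Int), Dom_white_field_filter field_list → Spec_white_field_filter field_list (white_field_filter field_list)

-- ===== LEMMAS AND PROOFS =====
-- the per-element decisions agree
theorem keep_agree (n : Int) :
    ((if n ∈ ([1, 3, 5, 7, 10, 12, 14, 16, 17, 19, 21, 23, 26, 28, 30, 32,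
               33, 35, 37, 39, 42, 44, 46, 48, 49, 51, 53, 55, 58, 60, 62, 64] : List Int) then false
      else if n < 2 ∨ n > 64 then false else true)
     = (decide (2 ≤ n) && decide (n ≤ 64) && (PySem.Int.mod (n + PySem.Int.floordiv (n - 1) 8) 2 == 0))) := by
  by_cases h1 : 2 ≤ n
  · by_cases h2 : n ≤ 64
    · interval_cases n <;> decide
    · simp only [PySem.Int.mod, PySem.Int.floordiv]
      split_ifs with hm <;> simp_all <;> omega
  · simp only [PySem.Int.mod, PySem.Int.floordiv]
    split_ifs with hm <;> simp_all <;> omega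

theorem foldl_keep (l : List Int) (acc : List Int) :
    l.foldl (fun filter_moves number =>
      if number ∈ ([1, 3, 5, 7, 10, 12, 14, 16, 17, 19, 21, 23, 26, 28, 30, 32,
                    33, 35, 37, 39, 42, 44, 46, 48, 49, 51, 53, 55, 58, 60, 62, 64] : List Int) then filter_moves
      else if number < 2 ∨ number > 64 then filter_moves
      else filter_moves ++ [number]) acc
    = acc ++ l.filter (fun n =>
        decide (2 ≤ n) && decide (n ≤ 64) && (PySem.Int.mod (n + PySem.Int.floordiv (n - 1) 8) 2 == 0)) := by
  induction l generalizing acc with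
  | nil => simp
  | cons x xs ih =>
    have h := keep_agree x
    simp only [List.foldl_cons, List.filter_cons]
    by_cases h1 : x ∈ ([1, 3, 5, 7, 10, 12, 14, 16, 17, 19, 21, 23, 26, 28, 30, 32,
                       33, 35, 37, 39, 42, 44, 46, 48, 49, 51, 53, 55, 58, 60, 62, 64] : List Int)
    · rw [if_pos h1] at h
      rw [if_pos h1, ← h]
      simpa using ih acc
    · rw [if_neg h1] at h
      by_cases h2 : x < 2 ∨ x > 64
      · rw [if_pos h2] at h
        rw [if_neg h1, if_pos h2, ← h]
        simpa using ih acc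
      · rw [if_neg h2] at h
        rw [if_neg h1, if_neg h2, ← h]
        simp only [if_pos rfl]
        rw [ih (acc ++ [x])]
        simp

-- ===== VERDICT (by name: the statement is the Claim_ definition above) =====
theorem white_field_filter_spec : Claim_equal_white_field_filter := by
  intro l _
  unfold Spec_white_field_filter white_field_filter white_field_filter_alt
  simpa using foldl_keep l []
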